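-- pv_equiv track=rewrite | github.com/feelcharles/OpenFi | system_core/monitoring/enhanced_health.py | _summarize_alerts
-- ===== SOURCE A (Python) =====
-- from typing import Optional, Any
--
-- def _summarize_alerts(alerts: list[dict[str, Any]]) -> dict[str, Any]:
--     """
--     Summarize alerts by severity and component.
--
--     Args:
--         alerts: List of alerts
--
--     Returns:
--         Dict containing alert summary
--     """
--     summary = {
--         "by_severity": {
--             "critical": 0,
--             "error": 0,
--             "warning": 0,
--             "info": 0
--         },
--         "by_component": {}
--     }
--
--     for alert in alerts:
--         severity = alert.get("severity", "unknown")
--         component = alert.get("component", "unknown")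
--
--         if severity in summary["by_severity"]:
--             summary["by_severity"][severity] += 1
--
--         if component not in summary["by_component"]:
--             summary["by_component"][component] = 0
--         summary["by_component"][component] += 1
--
--     return summary
-- ===== SOURCE B (Python) =====
-- from typing import Optional, Any
--
--
-- def _tally(xs) -> dict:
--     t = {}
--     for x in xs:
--         t[x] = t.get(x, 0) + 1
--     return t
--
--
-- def _summarize_alerts(alerts: list[dict[str, Any]]) -> dict[str, Any]:
--     sev = _tally(a.get("severity", "unknown") for a in alerts)
--     comp = _tally(a.get("component", "unknown") for a in alerts)
--     return {
--         "by_severity": {k: sev.get(k, 0) for k in ("critical", "error", "warning", "info")},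
--         "by_component": comp,
--     }
-- ===== Notes on version B (the rewrite author's own statement) =====
-- stated objective: alternative
-- what changed: Instead of one gated pass over a pre-seeded severity dict with in-loop membership/initialization tests, B builds two plain frequency tables with an ungated tally helper and then projects the four fixed severity keys out of the table with get(k,0).
import Mathlib
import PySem

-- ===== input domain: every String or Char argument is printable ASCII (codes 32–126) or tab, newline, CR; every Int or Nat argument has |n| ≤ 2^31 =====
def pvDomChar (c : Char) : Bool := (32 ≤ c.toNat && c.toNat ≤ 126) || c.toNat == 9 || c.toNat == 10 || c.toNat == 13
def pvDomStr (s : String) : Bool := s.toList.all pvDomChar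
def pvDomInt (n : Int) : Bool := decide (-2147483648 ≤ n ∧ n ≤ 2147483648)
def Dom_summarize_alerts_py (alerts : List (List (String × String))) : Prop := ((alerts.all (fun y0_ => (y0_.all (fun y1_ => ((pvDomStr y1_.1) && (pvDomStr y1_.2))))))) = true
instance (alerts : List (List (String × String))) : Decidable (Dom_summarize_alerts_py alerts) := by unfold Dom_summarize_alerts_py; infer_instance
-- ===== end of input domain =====

-- B replaces A's single gated pass over a pre-seeded severity dict by two plain tallies
-- plus a fixed-key projection (alternative decomposition, same cost).


-- ===== PORT A =====
-- loop body of A: update both tables for one alert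
def pvStepA (st : PySem.Dict String Int × PySem.Dict String Int) (alert : List (String × String)) :
    PySem.Dict String Int × PySem.Dict String Int :=
  let severity := (PySem.Dict.ofList alert).getD "severity" "unknown"
  let component := (PySem.Dict.ofList alert).getD "component" "unknown"
  let sev := if st.1.contains severity then st.1.modify severity 0 (· + 1) else st.1
  let comp := (if st.2.contains component then st.2 else st.2.insert component 0).modify component 0 (· + 1)
  (sev, comp)

def summarize_alerts_py (alerts : List (List (String × String))) : List (String × List (String × Int)) :=
  let init : PySem.Dict String Int :=
    PySem.Dict.ofList [("critical", 0), ("error", 0), ("warning", 0), ("info", 0)]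
  let st := alerts.foldl pvStepA (init, PySem.Dict.empty)
  [("by_severity", st.1.items), ("by_component", st.2.items)]

-- ===== PORT B =====
-- Source B's _tally helper: plain frequency table
def pvTally (xs : List String) : PySem.Dict String Int :=
  xs.foldl (fun t x => t.insert x (t.getD x 0 + 1)) PySem.Dict.empty

def summarize_alerts_py_alt (alerts : List (List (String × String))) : List (String × List (String × Int)) :=
  let sev := pvTally (alerts.map (fun a => (PySem.Dict.ofList a).getD "severity" "unknown"))
  let comp := pvTally (alerts.map (fun a => (PySem.Dict.ofList a).getD "component" "unknown"))
  [("by_severity", ["critical", "error", "warning", "info"].map (fun k => (k, sev.getD k 0))),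
   ("by_component", comp.items)]

-- ===== PRECONDITION & SPEC =====
def Spec_summarize_alerts_py (alerts : List (List (String × String))) (out : List (String × List (String × Int))) : Prop := out = summarize_alerts_py_alt alerts
instance (alerts : List (List (String × String))) (out : List (String × List (String × Int))) : Decidable (Spec_summarize_alerts_py alerts out) := by unfold Spec_summarize_alerts_py; infer_instance

-- ===== CLAIM (what is proved, stated in full; the proofs are below) =====
def Claim_equal_summarize_alerts_py : Prop := ∀ (alerts : List (List (String × String))), Dom_summarize_alerts_py alerts → Spec_summarize_alerts_py alerts (summarize_alerts_py alerts)

-- ===== LEMMAS AND PROOFS =====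

def pvSevOf (a : List (String × String)) : String := (PySem.Dict.ofList a).getD "severity" "unknown"
def pvCompOf (a : List (String × String)) : String := (PySem.Dict.ofList a).getD "component" "unknown"

def pvSevStep (d : PySem.Dict String Int) (s : String) : PySem.Dict String Int :=
  if d.contains s then d.modify s 0 (· + 1) else d

-- the component branch of A's loop is exactly Counter's update step
theorem pvCompStep_eq (d : PySem.Dict String Int) (c : String) :
    (if d.contains c then d else d.insert c 0).modify c 0 (· + 1) = d.modify c 0 (· + 1) := by
  by_cases h : d.contains c = true
  · simp [h]
  · have h' : d.contains c = false := by simpa using h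
    rw [if_neg (by simp [h'])]
    show (d.insert c 0).insert c (((d.insert c 0).getD c 0) + 1) = d.insert c ((d.getD c 0) + 1)
    rw [PySem.Dict.getD_insert_self, PySem.Dict.insert_insert_self,
        PySem.Dict.getD_of_not_contains d _ h']

theorem pvStepA_eq (st : PySem.Dict String Int × PySem.Dict String Int) (a : List (String × String)) :
    pvStepA st a = (pvSevStep st.1 (pvSevOf a), st.2.modify (pvCompOf a) 0 (· + 1)) := by
  simp only [pvStepA, pvSevStep, pvSevOf, pvCompOf, pvCompStep_eq]

-- A's severity loop only bumps existing keys: items gain the occurrence counts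
theorem pvSevFold (l : List String) (d : PySem.Dict String Int) (hnd : d.keys.Nodup) :
    (l.foldl pvSevStep d).items = d.items.map (fun p => (p.1, p.2 + (l.count p.1 : Int))) := by
  induction l generalizing d with
  | nil => simp
  | cons s l ih =>
    rw [List.foldl_cons]
    by_cases h : d.contains s = true
    · have hkeys : (d.modify s 0 (· + 1)).keys = d.keys := by
        show ((d.insert s _).keys) = d.keys
        exact PySem.Dict.keys_insert_of_contains d _ h
      have hstep : pvSevStep d s = d.modify s 0 (· + 1) := by simp [pvSevStep, h]
      rw [hstep, ih _ (by rw [hkeys]; exact hnd)]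
      show ((d.insert s (d.getD s 0 + 1)).items).map _ = _
      rw [PySem.Dict.items_insert_of_contains d _ h, List.map_map]
      refine List.map_congr_left (fun p hp => ?_)
      by_cases hps : p.1 = s
      · have hmem : (s, p.2) ∈ d.items := by
          have : (p.1, p.2) = p := rfl
          rw [← hps]; rw [this]; exact hp
        have hg : d.getD s 0 = p.2 := PySem.Dict.getD_of_mem_items d hmem hnd 0
        simp only [Function.comp, hps, BEq.rfl, if_pos]
        simp only [↓reduceIte, hg, List.count_cons, beq_self_eq_true]
        have : (p.1, p.2) = p := rfl
        rw [← this, hps]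
        refine Prod.ext rfl ?_
        simp
        ring
      · have hb : (p.1 == s) = false := by simpa using hps
        simp only [Function.comp, hb, Bool.false_eq_true, ↓reduceIte]
        refine Prod.ext rfl ?_
        simp [Ne.symm hps]
    · have h' : d.contains s = false := by simpa using h
      have hstep : pvSevStep d s = d := by simp [pvSevStep, h']
      rw [hstep, ih _ hnd]
      refine List.map_congr_left (fun p hp => ?_)
      have hpk : p.1 ∈ d.keys := PySem.Dict.mem_keys_of_mem_items d hp
      have hps : p.1 ≠ s := by
        intro hcontr
        have : d.contains s = true := (PySem.Dict.contains_iff_mem_keys d s).mpr (hcontr ▸ hpk)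
        simp [this] at h'
      refine Prod.ext rfl ?_
      simp [Ne.symm hps]

-- ===== VERDICT (by name: the statement is the Claim_ definition above) =====
theorem summarize_alerts_py_spec : Claim_equal_summarize_alerts_py := by
  intro alerts _
  show summarize_alerts_py alerts = summarize_alerts_py_alt alerts
  have hfun : pvStepA = fun st a => (pvSevStep st.1 (pvSevOf a), st.2.modify (pvCompOf a) 0 (· + 1)) := by
    funext st a; exact pvStepA_eq st a
  show [("by_severity", (List.foldl pvStepA
          (PySem.Dict.ofList [("critical", 0), ("error", 0), ("warning", 0), ("info", 0)],
           PySem.Dict.empty) alerts).1.items),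
        ("by_component", (List.foldl pvStepA
          (PySem.Dict.ofList [("critical", 0), ("error", 0), ("warning", 0), ("info", 0)],
           PySem.Dict.empty) alerts).2.items)]
      = [("by_severity", ["critical", "error", "warning", "info"].map
            (fun k => (k, (pvTally (alerts.map (fun a => (PySem.Dict.ofList a).getD "severity" "unknown"))).getD k 0))),
         ("by_component", (pvTally (alerts.map (fun a => (PySem.Dict.ofList a).getD "component" "unknown"))).items)]
  rw [hfun, PySem.List.foldl_prod_mk
        (fun (d : PySem.Dict String Int) (a : List (String × String)) => pvSevStep d (pvSevOf a))
        (fun (d : PySem.Dict String Int) (a : List (String × String)) =>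
          d.modify (pvCompOf a) 0 (fun x => x + 1))]
  have hcomp : List.foldl (fun d a => d.modify (pvCompOf a) 0 (· + 1)) PySem.Dict.empty alerts
      = pvTally (alerts.map (fun a => (PySem.Dict.ofList a).getD "component" "unknown")) := by
    show _ = pvTally (alerts.map pvCompOf)
    rw [pvTally, PySem.Dict.foldl_insert_getD_add_one_eq_counter, PySem.Dict.counter_eq_foldl,
        List.foldl_map]
  have hnd : (PySem.Dict.ofList
      [("critical", (0:Int)), ("error", 0), ("warning", 0), ("info", 0)]).keys.Nodup := by decide
  have hsev : List.foldl (fun d a => pvSevStep d (pvSevOf a))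
        (PySem.Dict.ofList [("critical", 0), ("error", 0), ("warning", 0), ("info", 0)]) alerts
      = List.foldl pvSevStep
        (PySem.Dict.ofList [("critical", 0), ("error", 0), ("warning", 0), ("info", 0)])
        (alerts.map pvSevOf) := by
    rw [List.foldl_map]
  have htally : ∀ k : String,
      (pvTally (alerts.map (fun a => (PySem.Dict.ofList a).getD "severity" "unknown"))).getD k 0
        = (((alerts.map pvSevOf).count k : Int)) := by
    intro k
    show (pvTally (alerts.map pvSevOf)).getD k 0 = _
    rw [pvTally, PySem.Dict.foldl_insert_getD_add_one_eq_counter, PySem.Dict.getD_counter]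
  have hitems : (PySem.Dict.ofList
      [("critical", (0:Int)), ("error", 0), ("warning", 0), ("info", 0)]).items
      = [("critical", (0:Int)), ("error", 0), ("warning", 0), ("info", 0)] := by decide
  rw [hcomp, hsev, pvSevFold _ _ hnd, hitems]
  simp [htally]
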